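-- pv_equiv track=rewrite | github.com/tunyash/cube_decomposition | small_certificate_large_local.py | is_cert_complexity_k
-- ===== SOURCE A (Python) =====
-- from itertools import product, combinations
-- from typing import List, Tuple
--
-- def take_log(two_to_n: int) -> int:
--     n = 1
--     while 2**n < two_to_n:
--         n += 1
--     return n
--
-- def is_cert_complexity_k(f: List[int], k: int, sign: int) -> bool:
--     n = take_log(len(f))
--     covered = [v != sign for v in f]
--     for t in combinations(range(n), k):
--         for signs in product([0,1], repeat=k):
--             must_be_one = sum(2**i for (i, j) in zip(t, signs) if j == 1)
--             must_be_zero = sum(2**i for (i, j) in zip(t, signs) if j == 0)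
--             good_cert = True
--             points = []
--             for i in range(2**n):
--                 if (i & must_be_one == must_be_one) and ((2**n-1-i) & must_be_zero == must_be_zero):
--                     points.append(i)
--                     if f[i] != sign:
--                         good_cert = False
--                         break
--             if good_cert:
--                 for p in points:
--                     covered[p] = True
--     return all(covered)
-- ===== SOURCE B (Python) =====
-- from itertools import product, combinations
-- from typing import List
--
--
-- def take_log(two_to_n: int) -> int:
--     n = 1
--     while 2**n < two_to_n:
--         n += 1
--     return n
--
--
-- def is_cert_complexity_k(f: List[int], k: int, sign: int) -> bool:
--     # Per k-subcube, enumerate only its 2^(n-k) points directly (anchor + free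
--     # coordinates) instead of scanning all 2^n points and filtering by masks.
--     n = take_log(len(f))
--     covered = [v != sign for v in f]
--     for t in combinations(range(n), k):
--         free = [c for c in range(n) if c not in t]
--         for base in product([0, 1], repeat=k):
--             pts = [sum(1 << c for c, b in zip(t, base) if b)]
--             for c in free:
--                 pts += [q | (1 << c) for q in pts]
--             if all(f[q] == sign for q in pts):
--                 for q in pts:
--                     covered[q] = True
--     return all(covered)
-- ===== Notes on version B (the rewrite author's own statement) =====
-- stated objective: alternative
-- what changed: Per k-subcube, B generates the subcube's own 2^(n-k) points directly (anchor mask plus all subsets of the free coordinates) instead of A's scan of all 2^n points with a two-mask membership test on each; same observed cost because A's scan breaks early.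
import Mathlib
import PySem

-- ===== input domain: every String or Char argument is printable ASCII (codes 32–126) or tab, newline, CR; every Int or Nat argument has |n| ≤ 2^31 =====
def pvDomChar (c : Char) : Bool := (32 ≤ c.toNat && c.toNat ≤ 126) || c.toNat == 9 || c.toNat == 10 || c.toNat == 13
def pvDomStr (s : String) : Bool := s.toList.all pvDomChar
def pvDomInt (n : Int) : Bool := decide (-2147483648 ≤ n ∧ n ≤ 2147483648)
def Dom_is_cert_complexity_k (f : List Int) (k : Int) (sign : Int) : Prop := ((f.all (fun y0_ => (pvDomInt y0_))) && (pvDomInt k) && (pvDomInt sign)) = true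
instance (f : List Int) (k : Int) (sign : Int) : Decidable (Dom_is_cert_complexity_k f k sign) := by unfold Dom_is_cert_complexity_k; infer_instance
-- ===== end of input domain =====

-- B replaces A's scan of all 2^n points per subcube (mask-filtering each) by directly
-- generating the subcube's own 2^(n-k) points from its anchor and free coordinates.

-- ===== PORT A =====
-- take_log: `n = 1; while 2**n < m: n += 1; return n`.  The loop runs fewer than m times
-- (2^m ≥ m), so fuel m is exact; both Pythons share this helper.
def take_log_go (m : Nat) : Nat → Nat → Nat
  | 0, n => n
  | fuel + 1, n => if 2 ^ n < m then take_log_go m fuel (n + 1) else n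

def take_log (m : Nat) : Nat := take_log_go m m 1

-- itertools.combinations(xs, r) (lexicographic, as itertools yields it)
def combs (r : Nat) (xs : List Nat) : List (List Nat) :=
  match r, xs with
  | 0, _ => [[]]
  | _ + 1, [] => []
  | r + 1, x :: xs' => ((combs r xs').map (x :: ·)) ++ combs (r + 1) xs'
  termination_by xs.length

-- itertools.product([0,1], repeat=r) (lexicographic, first coordinate slowest)
def prodBits : Nat → List (List Nat)
  | 0 => [[]]
  | r + 1 => [0, 1].flatMap (fun b => (prodBits r).map (b :: ·))

-- sum(2**i for (i, j) in zip(t, signs) if j == jv)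
def sumPow (ps : List (Nat × Nat)) (jv : Nat) : Nat :=
  ((ps.filter (fun cj => cj.2 == jv)).map (fun cj => 2 ^ cj.1)).sum

-- f[i]: exact while i < len f (Python raises IndexError past the end — those inputs are
-- outside Pre_); indices and masks are nonnegative Python ints, so Nat is exact here.
def fget (f : List Int) (i : Nat) : Int := f.getD i 0

-- the `for i in range(2**n): … break` scan: collects matching points, stops at a bad one
def scanA (f : List Int) (sign : Int) (N m1 m0 : Nat) :
    List Nat → List Nat → Bool × List Nat
  | [], points => (true, points)
  | i :: rest, points =>
    if (i &&& m1 == m1) && ((N - 1 - i) &&& m0 == m0) then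
      if fget f i != sign then (false, points ++ [i])
      else scanA f sign N m1 m0 rest (points ++ [i])
    else scanA f sign N m1 m0 rest points

def stepA (f : List Int) (sign : Int) (N : Nat) (cov : List Bool) (t signs : List Nat) :
    List Bool :=
  let m1 := sumPow (t.zip signs) 1
  let m0 := sumPow (t.zip signs) 0
  let r := scanA f sign N m1 m0 (List.range N) []
  if r.1 then r.2.foldl (fun c p => c.set p true) cov else cov

-- negative k makes Python's combinations raise ValueError (outside Pre_); toNat is exact for k ≥ 0
def is_cert_complexity_k (f : List Int) (k : Int) (sign : Int) : Bool :=
  let n := take_log f.length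
  let cov0 := f.map (fun v => v != sign)
  ((combs k.toNat (List.range n)).foldl
    (fun cov t =>
      (prodBits k.toNat).foldl (fun cov signs => stepA f sign (2 ^ n) cov t signs) cov)
    cov0).all id

-- ===== PORT B =====
-- pts = [anchor]; for c in free: pts += [q | (1 << c) for q in pts]
def genPts (free : List Nat) (anchor : Nat) : List Nat :=
  free.foldl (fun pts c => pts ++ pts.map (fun q => q ||| 2 ^ c)) [anchor]

def stepB (f : List Int) (sign : Int) (free : List Nat) (cov : List Bool)
    (t base : List Nat) : List Bool :=
  let pts := genPts free
    (((t.zip base).filter (fun cb => cb.2 != 0)).map (fun cb => 2 ^ cb.1)).sum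
  if pts.all (fun q => fget f q == sign) then pts.foldl (fun c p => c.set p true) cov
  else cov

def is_cert_complexity_k_alt (f : List Int) (k : Int) (sign : Int) : Bool :=
  let n := take_log f.length
  let cov0 := f.map (fun v => v != sign)
  ((combs k.toNat (List.range n)).foldl
    (fun cov t =>
      let free := (List.range n).filter (fun c => !(t.contains c))
      (prodBits k.toNat).foldl (fun cov base => stepB f sign free cov t base) cov)
    cov0).all id

-- ===== PRECONDITION & SPEC =====
-- smallest n ≥ 1 with 2^n ≥ L, i.e. take_log L, in closed form (Python int.bit_length)
def pvCubeDim (L : Nat) : Nat := max 1 (PySem.Int.bitLength ((L : Int) - 1))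

-- Python A raises ValueError on k < 0 and IndexError exactly when some constant-k-subcube
-- scan runs past the end of f: a subcube (coordinate mask u, anchor a ⊆ u) whose largest
-- point is ≥ len f and whose in-table points all carry the value sign.  Pre_ is the exact
-- complement: A returns normally on precisely these inputs (f of length 2^n is the intended
-- full truth table and always satisfies the quantified condition).
def Pre_is_cert_complexity_k (f : List Int) (k : Int) (sign : Int) : Prop :=
  0 ≤ k ∧
  ∀ u : Nat, u < 2 ^ pvCubeDim f.length → ∀ a : Nat, a < 2 ^ pvCubeDim f.length →
    (PySem.Int.bitCount (u : Int) = k.toNat ∧ a &&& u = a ∧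
      f.length ≤ a ||| ((2 ^ pvCubeDim f.length - 1) ^^^ u)) →
    ∃ x < f.length, x &&& u = a ∧ f.getD x 0 ≠ sign
instance (f : List Int) (k : Int) (sign : Int) : Decidable (Pre_is_cert_complexity_k f k sign) := by
  unfold Pre_is_cert_complexity_k; infer_instance

def pvWitness_is_cert_complexity_k : List Int × Int × Int := ([1, 1, 0, 1], 1, 1)

def Spec_is_cert_complexity_k (f : List Int) (k : Int) (sign : Int) (out : Bool) : Prop := out = is_cert_complexity_k_alt f k sign
instance (f : List Int) (k : Int) (sign : Int) (out : Bool) : Decidable (Spec_is_cert_complexity_k f k sign out) := by unfold Spec_is_cert_complexity_k; infer_instance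

-- ===== CLAIM (what is proved, stated in full; the proofs are below) =====
def Claim_equal_is_cert_complexity_k : Prop := ∀ (f : List Int) (k : Int) (sign : Int), Dom_is_cert_complexity_k f k sign → Pre_is_cert_complexity_k f k sign → Spec_is_cert_complexity_k f k sign (is_cert_complexity_k f k sign)

-- ===== LEMMAS AND PROOFS =====

-- combinations(xs, r): members are sublists of xs of length r
theorem combs_sublist {r : Nat} {xs t : List Nat} (h : t ∈ combs r xs) : t.Sublist xs := by
  induction xs generalizing r t with
  | nil =>
    cases r with
    | zero => simp [combs] at h; simp [h]
    | succ r => simp [combs] at h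
  | cons x xs ih =>
    cases r with
    | zero => simp [combs] at h; simp [h]
    | succ r =>
      simp only [combs, List.mem_append, List.mem_map] at h
      rcases h with ⟨t', ht', rfl⟩ | h
      · exact (ih ht').cons₂ x
      · exact (ih h).cons x

theorem combs_length {r : Nat} {xs t : List Nat} (h : t ∈ combs r xs) : t.length = r := by
  induction xs generalizing r t with
  | nil =>
    cases r with
    | zero => simp [combs] at h; simp [h]
    | succ r => simp [combs] at h
  | cons x xs ih =>
    cases r with
    | zero => simp [combs] at h; simp [h]
    | succ r =>
      simp only [combs, List.mem_append, List.mem_map] at h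
      rcases h with ⟨t', ht', rfl⟩ | h
      · simp [ih ht']
      · exact ih h

theorem prodBits_length {r : Nat} {s : List Nat} (h : s ∈ prodBits r) : s.length = r := by
  induction r generalizing s with
  | zero => simp [prodBits] at h; simp [h]
  | succ r ih =>
    simp only [prodBits, List.mem_flatMap, List.mem_map] at h
    obtain ⟨b, _, s', hs', rfl⟩ := h
    simp [ih hs']

theorem prodBits_bits {r : Nat} {s : List Nat} (h : s ∈ prodBits r) :
    ∀ j ∈ s, j = 0 ∨ j = 1 := by
  induction r generalizing s with
  | zero => simp [prodBits] at h; simp [h]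
  | succ r ih =>
    simp only [prodBits, List.mem_flatMap, List.mem_map] at h
    obtain ⟨b, hb, s', hs', rfl⟩ := h
    intro j hj
    rcases List.mem_cons.1 hj with rfl | hj
    · simpa using hb
    · exact ih hs' j hj

-- adding numbers with disjoint bits acts bitwise
theorem testBit_add_of_disjoint (i : Nat) :
    ∀ a b : Nat, (∀ j, (a.testBit j && b.testBit j) = false) →
      (a + b).testBit i = (a.testBit i || b.testBit i) := by
  induction i with
  | zero =>
    intro a b hz
    have h0 := hz 0
    simp only [Nat.testBit_zero] at h0 ⊢
    rw [Bool.eq_iff_iff]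
    simp only [Bool.and_eq_false_iff, decide_eq_false_iff_not, decide_eq_true_eq,
      Bool.or_eq_true] at h0 ⊢
    omega
  | succ i ih =>
    intro a b hz
    have h0 := hz 0
    simp only [Nat.testBit_zero, Bool.and_eq_false_iff, decide_eq_false_iff_not] at h0
    have hdiv : (a + b) / 2 = a / 2 + b / 2 := by omega
    rw [Nat.testBit_succ, Nat.testBit_succ, Nat.testBit_succ, hdiv]
    exact ih (a / 2) (b / 2) fun j => by
      have := hz (j + 1)
      rwa [Nat.testBit_succ, Nat.testBit_succ] at this

-- the bits of a sum of distinct powers of two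
theorem sum_pows_testBit {cs : List Nat} (h : cs.Nodup) : ∀ d : Nat,
    ((cs.map (2 ^ ·)).sum).testBit d = decide (d ∈ cs) := by
  induction cs with
  | nil => simp
  | cons c cs ih =>
    obtain ⟨hc, hnd⟩ := List.nodup_cons.1 h
    intro d
    simp only [List.map_cons, List.sum_cons]
    rw [testBit_add_of_disjoint d (2 ^ c) ((cs.map (2 ^ ·)).sum) (fun j => by
      rcases eq_or_ne j c with rfl | hne
      · rw [ih hnd]; simp [hc]
      · simp [Ne.symm hne])]
    rw [ih hnd d, Nat.testBit_two_pow]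
    simp [List.mem_cons, eq_comm]

-- a &&& b = b: b's bits are among a's
theorem land_eq_right_iff (a b : Nat) :
    a &&& b = b ↔ ∀ d, b.testBit d = true → a.testBit d = true := by
  constructor
  · intro h d hd
    have := congrArg (fun x => x.testBit d) h
    simp only [Nat.testBit_land, hd, Bool.and_true] at this
    exact this
  · intro h
    apply Nat.eq_of_testBit_eq
    intro j
    rw [Nat.testBit_land]
    cases hb : b.testBit j
    · simp
    · simp [h j hb]

-- zip with nodup firsts is injective on firsts
theorem zip_fst_inj {t signs : List Nat} (hnd : t.Nodup) {p p' : Nat × Nat}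
    (hp : p ∈ t.zip signs) (hp' : p' ∈ t.zip signs) (h1 : p.1 = p'.1) : p = p' := by
  obtain ⟨a, b⟩ := p
  obtain ⟨a', b'⟩ := p'
  simp only at h1
  subst h1
  induction t generalizing signs with
  | nil => simp at hp
  | cons c t ih =>
    cases signs with
    | nil => simp at hp
    | cons j s =>
      obtain ⟨hc, hndt⟩ := List.nodup_cons.1 hnd
      rcases List.mem_cons.1 hp with h | hpt <;> rcases List.mem_cons.1 hp' with h' | hpt'
      · exact h.trans h'.symm
      · injection h with h1 h2
        subst h1
        exact absurd (List.of_mem_zip hpt').1 hc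
      · injection h' with h1 h2
        subst h1
        exact absurd (List.of_mem_zip hpt).1 hc
      · exact ih hndt hpt hpt'

theorem mem_zip_of_mem_left {t signs : List Nat} (hl : t.length = signs.length)
    {c : Nat} (hc : c ∈ t) : ∃ j, (c, j) ∈ t.zip signs := by
  induction t generalizing signs with
  | nil => simp at hc
  | cons x t ih =>
    cases signs with
    | nil => simp at hl
    | cons j s =>
      rcases List.mem_cons.1 hc with rfl | hc
      · exact ⟨j, by simp⟩
      · obtain ⟨j', hj'⟩ := ih (by simpa using hl) hc
        exact ⟨j', List.mem_cons_of_mem _ hj'⟩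

-- membership in B's generated point list
theorem genPts_fold_mem (fs : List Nat) (hnd : fs.Nodup) :
    ∀ (P : List Nat), (∀ q ∈ P, ∀ c ∈ fs, q.testBit c = false) → ∀ x,
      (x ∈ fs.foldl (fun pts c => pts ++ pts.map (fun q => q ||| 2 ^ c)) P ↔
        ∃ q ∈ P, ∀ d, d ∉ fs → x.testBit d = q.testBit d) := by
  induction fs with
  | nil =>
    intro P _ x
    simp only [List.foldl_nil, List.not_mem_nil, not_false_iff, forall_const]
    constructor
    · intro hx; exact ⟨x, hx, fun d => rfl⟩
    · rintro ⟨q, hq, hbits⟩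
      have : x = q := Nat.eq_of_testBit_eq fun j => hbits j
      simpa [this]
  | cons c fs ih =>
    intro P hP x
    obtain ⟨hc, hndt⟩ := List.nodup_cons.1 hnd
    rw [List.foldl_cons]
    rw [ih hndt (P ++ P.map (fun q => q ||| 2 ^ c)) ?_ x]
    · constructor
      · rintro ⟨q', hq', hbits⟩
        rcases List.mem_append.1 hq' with hq | hq
        · exact ⟨q', hq, fun d hd => hbits d (fun h => hd (List.mem_cons_of_mem _ h))⟩
        · obtain ⟨q, hqP, rfl⟩ := List.mem_map.1 hq
          refine ⟨q, hqP, fun d hd => ?_⟩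
          have hdc : d ≠ c := fun h => hd (h ▸ List.mem_cons_self ..)
          have hdfs : d ∉ fs := fun h => hd (List.mem_cons_of_mem _ h)
          rw [hbits d hdfs, Nat.testBit_lor, Nat.testBit_two_pow]
          simp [Ne.symm hdc]
      · rintro ⟨q, hq, hbits⟩
        refine ⟨if x.testBit c then q ||| 2 ^ c else q, ?_, fun d hd => ?_⟩
        · by_cases hxc : x.testBit c <;>
            simp [hxc, List.mem_append, List.mem_map]
          · right; exact ⟨q, hq, rfl⟩
          · left; exact hq
        · have hqc : q.testBit c = false := hP q hq c (List.mem_cons_self ..)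
          rcases eq_or_ne d c with rfl | hdc
          · by_cases hxc : x.testBit d <;>
              simp [hxc, hqc]
          · have hdcons : d ∉ c :: fs := by simp [hdc, hd]
            rw [hbits d hdcons]
            by_cases hxc : x.testBit c <;>
              simp [hxc, Ne.symm hdc]
    · intro q hq c' hc'
      rcases List.mem_append.1 hq with hq | hq
      · exact hP q hq c' (List.mem_cons_of_mem _ hc')
      · obtain ⟨q0, hq0, rfl⟩ := List.mem_map.1 hq
        rw [Nat.testBit_lor, Nat.testBit_two_pow, hP q0 hq0 c' (List.mem_cons_of_mem _ hc')]
        have : c ≠ c' := fun h => hc (h ▸ hc')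
        simp [this]

-- scanA: the break-scan decides "every matching point carries sign" …
theorem scanA_fst (f : List Int) (sign : Int) (N m1 m0 : Nat) :
    ∀ (is acc : List Nat),
      (scanA f sign N m1 m0 is acc).1 =
        (is.filter (fun i => (i &&& m1 == m1) && ((N - 1 - i) &&& m0 == m0))).all
          (fun i => fget f i == sign) := by
  intro is
  induction is with
  | nil => intro acc; simp [scanA]
  | cons i rest ih =>
    intro acc
    simp only [scanA, List.filter_cons]
    by_cases hcond : ((i &&& m1 == m1) && ((N - 1 - i) &&& m0 == m0)) = true
    · rw [if_pos hcond, hcond]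
      by_cases hbad : (fget f i != sign) = true
      · rw [if_pos hbad]
        have : (fget f i == sign) = false := by
          simpa [bne] using hbad
        simp [this]
      · rw [if_neg hbad, ih]
        have : (fget f i == sign) = true := by
          simpa [bne] using hbad
        simp [this]
    · rw [if_neg hcond, ih]
      simp [hcond]

-- … and, when it succeeds, has collected exactly the matching points
theorem scanA_snd (f : List Int) (sign : Int) (N m1 m0 : Nat) :
    ∀ (is acc : List Nat), (scanA f sign N m1 m0 is acc).1 = true →
      (scanA f sign N m1 m0 is acc).2 =
        acc ++ is.filter (fun i => (i &&& m1 == m1) && ((N - 1 - i) &&& m0 == m0)) := by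
  intro is
  induction is with
  | nil => intro acc _; simp [scanA]
  | cons i rest ih =>
    intro acc hgood
    simp only [scanA, List.filter_cons] at hgood ⊢
    by_cases hcond : ((i &&& m1 == m1) && ((N - 1 - i) &&& m0 == m0)) = true
    · rw [if_pos hcond] at hgood ⊢
      rw [hcond]
      by_cases hbad : (fget f i != sign) = true
      · rw [if_pos hbad] at hgood; simp at hgood
      · rw [if_neg hbad] at hgood ⊢
        rw [ih _ hgood]
        simp
    · rw [if_neg hcond] at hgood ⊢
      rw [ih _ hgood]
      simp [hcond]

-- marking a set of positions true depends only on the set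
theorem setFold_getElem? (l : List Nat) :
    ∀ (c : List Bool) (j : Nat),
      (l.foldl (fun c p => c.set p true) c)[j]? =
        if j ∈ l then (c.set j true)[j]? else getElem? c j := by
  induction l with
  | nil => intro c j; simp
  | cons p l ih =>
    intro c j
    rw [List.foldl_cons, ih]
    by_cases hjl : j ∈ l
    · rw [if_pos hjl, if_pos (List.mem_cons_of_mem p hjl)]
      simp [List.getElem?_set, List.length_set]
    · rcases eq_or_ne j p with rfl | hjp
      · rw [if_neg hjl, if_pos (List.mem_cons_self ..)]
      · rw [if_neg hjl, if_neg (by simp [hjp, hjl])]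
        simp [Ne.symm hjp]

theorem setFold_eq_of_mem_iff {l1 l2 : List Nat} (h : ∀ x, x ∈ l1 ↔ x ∈ l2)
    (c : List Bool) :
    l1.foldl (fun c p => c.set p true) c = l2.foldl (fun c p => c.set p true) c := by
  apply List.ext_getElem?
  intro j
  rw [setFold_getElem?, setFold_getElem?]
  exact if_congr (h j) rfl rfl

-- one subcube: A's filtered scan and B's generated points agree
theorem step_eq (f : List Int) (sign : Int) (n : Nat) {t signs : List Nat}
    (hsub : t.Sublist (List.range n)) (hlen : t.length = signs.length)
    (hsig : ∀ j ∈ signs, j = 0 ∨ j = 1) (cov : List Bool) :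
    stepA f sign (2 ^ n) cov t signs =
      stepB f sign ((List.range n).filter (fun c => !(t.contains c))) cov t signs := by
  simp only [stepA, stepB]
  have hndt : t.Nodup := hsub.nodup List.nodup_range
  have htlt : ∀ c ∈ t, c < n := fun c hc => List.mem_range.1 (hsub.subset hc)
  -- the coordinate lists behind the two masks
  set ps := t.zip signs with hps
  set cs1 := (ps.filter (fun cj => cj.2 == 1)).map Prod.fst with hcs1
  set cs0 := (ps.filter (fun cj => cj.2 == 0)).map Prod.fst with hcs0
  have hmapfst : ps.map Prod.fst = t := List.map_fst_zip (le_of_eq hlen)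
  have hcs1sub : cs1.Sublist t := hmapfst ▸ (List.filter_sublist.map Prod.fst)
  have hcs0sub : cs0.Sublist t := hmapfst ▸ (List.filter_sublist.map Prod.fst)
  have hfstmem : ∀ p ∈ ps, p.1 ∈ t := fun p hp => by
    obtain ⟨a, b⟩ := p; exact (List.of_mem_zip hp).1
  have hsndmem : ∀ p ∈ ps, p.2 = 0 ∨ p.2 = 1 := fun p hp => by
    obtain ⟨a, b⟩ := p; exact hsig b (List.of_mem_zip hp).2
  have hm1bit : ∀ d, (sumPow ps 1).testBit d = decide (d ∈ cs1) := by
    intro d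
    have := sum_pows_testBit ((hcs1sub.nodup hndt)) d
    rw [← this, hcs1, List.map_map]
    rfl
  have hm0bit : ∀ d, (sumPow ps 0).testBit d = decide (d ∈ cs0) := by
    intro d
    have := sum_pows_testBit ((hcs0sub.nodup hndt)) d
    rw [← this, hcs0, List.map_map]
    rfl
  have hmem1 : ∀ d, d ∈ cs1 ↔ ∃ p ∈ ps, p.1 = d ∧ p.2 = 1 := by
    intro d
    simp only [hcs1, List.mem_map, List.mem_filter, beq_iff_eq]
    constructor
    · rintro ⟨p, ⟨hp, h2⟩, rfl⟩; exact ⟨p, hp, rfl, h2⟩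
    · rintro ⟨p, hp, rfl, h2⟩; exact ⟨p, ⟨hp, h2⟩, rfl⟩
  have hmem0 : ∀ d, d ∈ cs0 ↔ ∃ p ∈ ps, p.1 = d ∧ p.2 = 0 := by
    intro d
    simp only [hcs0, List.mem_map, List.mem_filter, beq_iff_eq]
    constructor
    · rintro ⟨p, ⟨hp, h2⟩, rfl⟩; exact ⟨p, hp, rfl, h2⟩
    · rintro ⟨p, hp, rfl, h2⟩; exact ⟨p, ⟨hp, h2⟩, rfl⟩
  -- membership in cs1 matches the sign of the pair
  have hkey : ∀ p ∈ ps, decide (p.1 ∈ cs1) = decide (p.2 = 1) := by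
    intro p hp
    rcases hsndmem p hp with h0 | h1
    · have : p.1 ∉ cs1 := by
        rw [hmem1]
        rintro ⟨p', hp', hfst, h1'⟩
        have := zip_fst_inj hndt hp' hp hfst
        rw [← this, h1'] at h0
        exact absurd h0 one_ne_zero
      simp [this, h0]
    · have : p.1 ∈ cs1 := (hmem1 p.1).2 ⟨p, hp, rfl, h1⟩
      simp [this, h1]
  -- the mask test of A characterized by bits on t
  have hcondA : ∀ x, x < 2 ^ n →
      (((x &&& sumPow ps 1 == sumPow ps 1) &&
        ((2 ^ n - 1 - x) &&& sumPow ps 0 == sumPow ps 0)) = true ↔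
        ∀ p ∈ ps, x.testBit p.1 = decide (p.2 = 1)) := by
    intro x hx
    have hsub1 : 2 ^ n - 1 - x = 2 ^ n - (x + 1) := by omega
    rw [Bool.and_eq_true, beq_iff_eq, beq_iff_eq, land_eq_right_iff, land_eq_right_iff]
    constructor
    · rintro ⟨h1, h0⟩ p hp
      rcases hsndmem p hp with hj | hj
      · have hd0 : p.1 ∈ cs0 := (hmem0 p.1).2 ⟨p, hp, rfl, hj⟩
        have := h0 p.1 (by rw [hm0bit]; simp [hd0])
        rw [hsub1, Nat.testBit_two_pow_sub_succ hx] at this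
        simp only [Bool.and_eq_true, Bool.not_eq_eq_eq_not, Bool.not_true] at this
        simp [this.2, hj]
      · have hd1 : p.1 ∈ cs1 := (hmem1 p.1).2 ⟨p, hp, rfl, hj⟩
        have := h1 p.1 (by rw [hm1bit]; simp [hd1])
        simp [this, hj]
    · intro hall
      constructor
      · intro d hd
        rw [hm1bit] at hd
        obtain ⟨p, hp, rfl, hj⟩ := (hmem1 d).1 (of_decide_eq_true hd)
        rw [hall p hp, hj]
        simp
      · intro d hd
        rw [hm0bit] at hd
        obtain ⟨p, hp, rfl, hj⟩ := (hmem0 d).1 (of_decide_eq_true hd)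
        have hdn : p.1 < n := htlt p.1 (hfstmem p hp)
        rw [hsub1, Nat.testBit_two_pow_sub_succ hx, hall p hp, hj]
        simp [hdn]
  -- the anchor of B is the must_be_one mask of A
  have hanchor : ((ps.filter (fun cb => cb.2 != 0)).map (fun cb => 2 ^ cb.1)).sum
      = sumPow ps 1 := by
    unfold sumPow
    congr 1
    apply congrArg
    apply List.filter_congr
    intro p hp
    rcases hsndmem p hp with h | h <;> simp [h]
  set free := (List.range n).filter (fun c => !(t.contains c)) with hfree
  have hfnd : free.Nodup := List.nodup_range.filter _
  have hfmem : ∀ d, d ∈ free ↔ d < n ∧ d ∉ t := by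
    intro d
    simp [hfree, List.mem_filter, List.mem_range]
  have hcs1n : ∀ d ∈ cs1, d < n := fun d hd => htlt d (hcs1sub.subset hd)
  -- membership in the generated point list of B, characterized the same way
  have hpts : ∀ x, x ∈ genPts free (sumPow ps 1) ↔
      x < 2 ^ n ∧ ∀ p ∈ ps, x.testBit p.1 = decide (p.2 = 1) := by
    intro x
    unfold genPts
    rw [genPts_fold_mem free hfnd [sumPow ps 1] ?hP x]
    case hP =>
      intro q hq c hc
      rw [List.mem_singleton] at hq
      subst hq
      rw [hm1bit]
      have : c ∉ cs1 := fun h => ((hfmem c).1 hc).2 (hcs1sub.subset h)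
      simp [this]
    simp only [List.mem_singleton, exists_eq_left]
    constructor
    · intro hbits
      have hxlt : x < 2 ^ n := by
        apply Nat.lt_pow_two_of_testBit
        intro i hi
        have hnotfree : i ∉ free := fun h => absurd ((hfmem i).1 h).1 (by omega)
        rw [hbits i hnotfree, hm1bit]
        have : i ∉ cs1 := fun h => absurd (hcs1n i h) (by omega)
        simp [this]
      refine ⟨hxlt, fun p hp => ?_⟩
      have hnotfree : p.1 ∉ free := fun h => ((hfmem p.1).1 h).2 (hfstmem p hp)
      rw [hbits p.1 hnotfree, hm1bit, hkey p hp]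
    · rintro ⟨hxlt, hall⟩ d hd
      by_cases hdn : d < n
      · have hdt : d ∈ t := by
          by_contra hdt
          exact hd ((hfmem d).2 ⟨hdn, hdt⟩)
        obtain ⟨j, hj⟩ := mem_zip_of_mem_left hlen hdt
        rw [hall (d, j) hj, hm1bit, hkey (d, j) hj]
      · have h1 : x.testBit d = false :=
          Nat.testBit_lt_two_pow
            (lt_of_lt_of_le hxlt (Nat.pow_le_pow_right (by norm_num) (by omega)))
        have h2 : d ∉ cs1 := fun h => absurd (hcs1n d h) hdn
        rw [h1, hm1bit]
        simp [h2]
  -- assemble: same good flag, same marked set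
  have hLf : ∀ x, x ∈ (List.range (2 ^ n)).filter
      (fun i => (i &&& sumPow ps 1 == sumPow ps 1) &&
        ((2 ^ n - 1 - i) &&& sumPow ps 0 == sumPow ps 0)) ↔
      x ∈ genPts free (sumPow ps 1) := by
    intro x
    rw [List.mem_filter, List.mem_range, hpts x]
    constructor
    · rintro ⟨hx, hc⟩; exact ⟨hx, (hcondA x hx).1 hc⟩
    · rintro ⟨hx, hc⟩; exact ⟨hx, (hcondA x hx).2 hc⟩
  rw [hanchor, scanA_fst]
  have hflag : ((List.range (2 ^ n)).filter
      (fun i => (i &&& sumPow ps 1 == sumPow ps 1) &&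
        ((2 ^ n - 1 - i) &&& sumPow ps 0 == sumPow ps 0))).all
      (fun i => fget f i == sign) =
      (genPts free (sumPow ps 1)).all (fun q => fget f q == sign) := by
    rw [Bool.eq_iff_iff]
    simp only [List.all_eq_true]
    constructor
    · intro H x hx; exact H x ((hLf x).2 hx)
    · intro H x hx; exact H x ((hLf x).1 hx)
  rw [hflag]
  by_cases hgood : (genPts free (sumPow ps 1)).all (fun q => fget f q == sign) = true
  · rw [if_pos hgood, if_pos hgood]
    rw [scanA_snd _ _ _ _ _ _ _ (by rw [scanA_fst, hflag]; exact hgood)]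
    rw [List.nil_append]
    exact setFold_eq_of_mem_iff hLf cov
  · rw [if_neg hgood, if_neg hgood]

-- the two ports agree on every input
theorem ports_eq (f : List Int) (k : Int) (sign : Int) :
    is_cert_complexity_k f k sign = is_cert_complexity_k_alt f k sign := by
  simp only [is_cert_complexity_k, is_cert_complexity_k_alt]
  congr 1
  apply PySem.List.foldl_congr_mem
  intro cov t ht
  apply PySem.List.foldl_congr_mem
  intro cov2 signs hs
  exact step_eq f sign (take_log f.length) (combs_sublist ht)
    ((combs_length ht).trans (prodBits_length hs).symm) (prodBits_bits hs) cov2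

-- ===== VERDICT (by name: the statement is the Claim_ definition above) =====
theorem is_cert_complexity_k_spec : Claim_equal_is_cert_complexity_k := by
  intro f k sign _ _
  unfold Spec_is_cert_complexity_k
  exact ports_eq f k sign
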